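-- pv_equiv track=rewrite | github.com/chunyang-zhang/MOT_Thesis_1551025_1551034 | convert_label_file/convertlabel.py | reorder_label
-- ===== SOURCE A (Python) =====
-- def reorder_label(label_list):
--     reorder_label_dict = dict()
--     i = 0
--     for label in label_list:
--         object_label = []
--         if(label[0] =='0'):
--             object_label.append(label)
--             reorder_label_dict[label[1]]=object_label
--             i+=1
--         else:
--             break
--     for j in range(i,len(label_list)):
--         #acess to the index
--         if(label_list[j][1]in reorder_label_dict.keys()):
--             reorder_label_dict[label_list[j][1]].append(label_list[j])
--     return reorder_label_dict
-- ===== SOURCE B (Python) =====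
-- def reorder_label(label_list):
--     # find the length of the leading block of labels with label[0] == '0'
--     n = 0
--     while n < len(label_list) and label_list[n][0] == '0':
--         n += 1
--     prefix, suffix = label_list[:n], label_list[n:]
--     keys = list(dict.fromkeys(label[1] for label in prefix))
--     # group per key: last prefix label with that key, then all suffix labels with it
--     return {k: [label for label in prefix if label[1] == k][-1:]
--                + [label for label in suffix if label[1] == k]
--             for k in keys}
-- ===== Notes on version B (the rewrite author's own statement) =====
-- stated objective: alternative
-- what changed: Replaces A's mutating-dict passes (build entries in a first loop, append in an index-driven second loop) with a slice/comprehension construction: find the '0'-prefix length, dedup the prefix keys with dict.fromkeys, and build each group directly as last-matching-prefix-label plus a per-key filter of the suffix, with no dict mutation at all.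
import Mathlib
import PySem

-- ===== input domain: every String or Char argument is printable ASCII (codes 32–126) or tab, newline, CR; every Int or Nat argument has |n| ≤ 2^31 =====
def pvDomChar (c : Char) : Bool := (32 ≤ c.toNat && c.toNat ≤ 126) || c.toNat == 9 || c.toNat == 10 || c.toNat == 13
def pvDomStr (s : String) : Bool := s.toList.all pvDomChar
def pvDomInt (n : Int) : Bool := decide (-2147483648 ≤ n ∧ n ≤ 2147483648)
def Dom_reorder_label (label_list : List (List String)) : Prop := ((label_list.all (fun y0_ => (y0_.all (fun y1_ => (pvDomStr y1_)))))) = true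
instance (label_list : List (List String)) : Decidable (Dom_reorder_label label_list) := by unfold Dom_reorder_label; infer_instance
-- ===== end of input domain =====

-- B replaces A's two mutating-dict passes by a non-mutating construction: prefix length,
-- dict.fromkeys dedup of the prefix keys, and one per-key filter comprehension per group.

-- ===== PORT A =====
-- first loop of A: while label[0] == '0', set dict[label[1]] = [label] and i += 1; break otherwise
def reorderA_phase1 : List (List String) → PySem.Dict String (List (List String)) → Int →
    PySem.Dict String (List (List String)) × Int
  | [], d, i => (d, i)
  | label :: rest, d, i =>
    if PySem.List.pyGetD label 0 "" = "0" then
      reorderA_phase1 rest (d.insert (PySem.List.pyGetD label 1 "") [label]) (i + 1)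
    else (d, i)

def reorder_label (label_list : List (List String)) : List (String × List (List String)) :=
  let p := reorderA_phase1 label_list PySem.Dict.empty 0
  -- second loop: for j in range(i, len(label_list)): append label_list[j] if its key exists
  ((PySem.List.pyRange p.2 (label_list.length : Int) 1).foldl
    (fun d j =>
      let label := PySem.List.pyGetD label_list j []
      if d.contains (PySem.List.pyGetD label 1 "") then
        d.modify (PySem.List.pyGetD label 1 "") [] (fun v => v ++ [label])
      else d) p.1).items

-- ===== PORT B =====
-- B's while loop: n advances while label_list[n][0] == '0'
def reorderB_count : List (List String) → Nat
  | [] => 0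
  | label :: rest =>
    if PySem.List.pyGetD label 0 "" = "0" then reorderB_count rest + 1 else 0

def reorder_label_alt (label_list : List (List String)) : List (String × List (List String)) :=
  let n := reorderB_count label_list
  let pre := PySem.List.slice label_list none (some (n : Int))
  let suf := PySem.List.slice label_list (some (n : Int)) none
  let keys := PySem.List.dedup (pre.map (fun label => PySem.List.pyGetD label 1 ""))
  keys.map (fun k =>
    (k, PySem.List.slice (pre.filter (fun label => PySem.List.pyGetD label 1 "" == k)) (some (-1)) none
        ++ suf.filter (fun label => PySem.List.pyGetD label 1 "" == k)))

-- ===== PRECONDITION & SPEC =====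
-- Pre_ excludes exactly the inputs on which Python A raises IndexError: some label shorter than 2
def Pre_reorder_label (label_list : List (List String)) : Prop :=
  ∀ l ∈ label_list, 2 ≤ l.length
instance (label_list : List (List String)) : Decidable (Pre_reorder_label label_list) := by
  unfold Pre_reorder_label; infer_instance

def pvWitness_reorder_label : List (List String) := [["0", "a"], ["1", "b"], ["2", "a"]]

def Spec_reorder_label (label_list : List (List String)) (out : List (String × List (List String))) : Prop := out = reorder_label_alt label_list
instance (label_list : List (List String)) (out : List (String × List (List String))) : Decidable (Spec_reorder_label label_list out) := by unfold Spec_reorder_label; infer_instance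

-- ===== CLAIM (what is proved, stated in full; the proofs are below) =====
def Claim_equal_reorder_label : Prop := ∀ (label_list : List (List String)), Dom_reorder_label label_list → Pre_reorder_label label_list → Spec_reorder_label label_list (reorder_label label_list)

-- ===== LEMMAS AND PROOFS =====

-- named loop bodies of the two programs, for the proofs
def pvKey (label : List String) : String := PySem.List.pyGetD label 1 ""

def pvIns (d : PySem.Dict String (List (List String))) (label : List String) :
    PySem.Dict String (List (List String)) :=
  d.insert (pvKey label) [label]

def pvApp (d : PySem.Dict String (List (List String))) (label : List String) :
    PySem.Dict String (List (List String)) :=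
  if d.contains (pvKey label) then
    d.modify (pvKey label) [] (fun v => v ++ [label])
  else d

def pvP (label : List String) : Bool := PySem.List.pyGetD label 0 "" == "0"

-- A's first loop is takeWhile + a fold, and i counts the consumed prefix
theorem phase1_eq (xs : List (List String)) (d : PySem.Dict String (List (List String))) (i : Int) :
    reorderA_phase1 xs d i =
      ((xs.takeWhile pvP).foldl pvIns d, i + ((xs.takeWhile pvP).length : Int)) := by
  induction xs generalizing d i with
  | nil => simp [reorderA_phase1]
  | cons label rest ih =>
    by_cases h : PySem.List.pyGetD label 0 "" = "0"
    · simp [reorderA_phase1, h, pvP, pvIns, pvKey, ih]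
      ring
    · simp [reorderA_phase1, h, pvP]

-- B's counter is the length of the same takeWhile prefix
theorem count_eq (xs : List (List String)) :
    reorderB_count xs = (xs.takeWhile pvP).length := by
  induction xs with
  | nil => rfl
  | cons label rest ih =>
    by_cases h : PySem.List.pyGetD label 0 "" = "0"
    · simp [reorderB_count, h, pvP, ih]
    · simp [reorderB_count, h, pvP]

-- the append loop never changes the key set of the dict
theorem keys_pvApp (d : PySem.Dict String (List (List String))) (label : List String) :
    (pvApp d label).keys = d.keys := by
  by_cases h : d.contains (pvKey label)
  · simp [pvApp, h, PySem.Dict.keys_insert_of_contains]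
  · simp [pvApp, h]

theorem keys_foldl_pvApp (xs : List (List String)) (d : PySem.Dict String (List (List String))) :
    (xs.foldl pvApp d).keys = d.keys := by
  induction xs generalizing d with
  | nil => rfl
  | cons label rest ih => rw [List.foldl_cons, ih, keys_pvApp]

-- value at a key already present: the append loop appends exactly the matching labels
theorem getD_foldl_pvApp (xs : List (List String)) (d : PySem.Dict String (List (List String)))
    (k : String) (hk : d.contains k = true) :
    (xs.foldl pvApp d).getD k [] = d.getD k [] ++ xs.filter (fun l => pvKey l == k) := by
  induction xs generalizing d with
  | nil => simp
  | cons label rest ih =>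
    by_cases h : d.contains (pvKey label)
    · have hstep : pvApp d label = d.modify (pvKey label) [] (fun v => v ++ [label]) := by
        simp [pvApp, h]
      by_cases hkk : pvKey label = k
      · subst hkk
        simp only [List.foldl_cons, hstep, List.filter_cons, beq_self_eq_true]
        rw [ih _ (by simp [PySem.Dict.contains_modify, hk])]
        simp
      · simp only [List.foldl_cons, hstep, List.filter_cons]
        rw [ih _ (by simp [PySem.Dict.contains_modify, hk])]
        simp [PySem.Dict.getD_modify, hkk, Ne.symm hkk]
    · have hkk : pvKey label ≠ k := by
        intro e; rw [e] at h; exact h hk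
      have hstep : pvApp d label = d := by simp [pvApp, h]
      rw [List.foldl_cons, hstep, ih d hk, List.filter_cons]
      simp [hkk]
-- value built by A's first loop: singleton of the LAST prefix label with that key (or untouched)
theorem getLastD_congr {α : Type} (F : List α) (h : F ≠ []) (x y : α) :
    F.getLastD x = F.getLastD y := by
  cases F with
  | nil => exact absurd rfl h
  | cons a t => rfl

theorem getD_foldl_pvIns (xs : List (List String)) (d : PySem.Dict String (List (List String)))
    (k : String) :
    (xs.foldl pvIns d).getD k [] =
      if (xs.filter (fun l => pvKey l == k)).isEmpty then d.getD k []
      else [(xs.filter (fun l => pvKey l == k)).getLastD []] := by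
  induction xs generalizing d with
  | nil => simp
  | cons label rest ih =>
    rw [List.foldl_cons, ih, List.filter_cons]
    by_cases hkk : pvKey label = k
    · simp only [hkk, beq_self_eq_true, if_true]
      by_cases he : (rest.filter (fun l => pvKey l == k)).isEmpty
      · have he' : rest.filter (fun l => pvKey l == k) = [] := List.isEmpty_iff.mp he
        simp [he', pvIns, hkk, PySem.Dict.getD_insert_self]
      · have hne : rest.filter (fun l => pvKey l == k) ≠ [] := by
          simpa [List.isEmpty_iff] using he
        rw [if_neg he, if_neg (by simp)]
        rw [List.getLastD_cons, getLastD_congr _ hne label []]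
    · have hb : (pvKey label == k) = false := by simpa using hkk
      simp only [hb, Bool.false_eq_true, if_false]
      by_cases he : (rest.filter (fun l => pvKey l == k)).isEmpty
      · rw [if_pos he, if_pos he]
        simp [pvIns, PySem.Dict.getD_insert, Ne.symm hkk]
      · rw [if_neg he, if_neg he]

-- A's prefix dict keys: first occurrences of the prefix keys, in order
theorem keys_foldl_pvIns (xs : List (List String)) :
    (xs.foldl pvIns PySem.Dict.empty).keys = PySem.Set.ofList (xs.map pvKey) := by
  have h := PySem.Dict.keys_foldl_insert_key (l := xs) (key := pvKey)
    (f := fun _ label => [label]) (d := (PySem.Dict.empty : PySem.Dict String (List (List String))))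
  simpa [pvIns, PySem.Dict.keys_empty, PySem.Set.update_nil_left] using h

-- xs[-1:] of a nonempty list is the singleton of its last element
theorem slice_last (xs : List (List String)) (h : xs ≠ []) :
    PySem.List.slice xs (some (-1)) none = [xs.getLastD []] := by
  rw [PySem.List.slice_from_neg_one]
  induction xs with
  | nil => exact absurd rfl h
  | cons a t ih =>
    cases t with
    | nil => simp
    | cons b t' => simpa using ih (by simp)

-- take (length of takeWhile) = takeWhile
theorem take_count (xs : List (List String)) :
    xs.take ((xs.takeWhile pvP).length) = xs.takeWhile pvP := by
  induction xs with
  | nil => rfl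
  | cons a t ih =>
    by_cases h : pvP a
    · simp [h, ih]
    · simp [h]

theorem drop_count (xs : List (List String)) :
    xs.drop ((xs.takeWhile pvP).length) = xs.dropWhile pvP := by
  induction xs with
  | nil => rfl
  | cons a t ih =>
    by_cases h : pvP a
    · simp [h, ih]
    · simp [h]

-- ===== VERDICT (by name: the statement is the Claim_ definition above) =====
theorem reorder_label_spec : Claim_equal_reorder_label := by
  intro xs _ _
  unfold Spec_reorder_label reorder_label reorder_label_alt
  rw [phase1_eq]
  set P := xs.takeWhile pvP with hP
  set S := xs.dropWhile pvP with hS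
  -- A's second loop over indices is a fold over the dropped suffix
  have h := PySem.List.foldl_pyRange_pyGetD' (xs := xs) (a := (0 : Int) + ((P.length : Int)))
      (d := []) (f := pvApp) (init := P.foldl pvIns PySem.Dict.empty) (by positivity)
  simp only [pvApp, pvKey] at h
  simp only [zero_add] at h ⊢
  rw [h]
  have hdrop : xs.drop ((P.length : Int)).toNat = S := by
    rw [Int.toNat_natCast]; exact drop_count xs
  rw [hdrop]
  -- B's slices are the same prefix/suffix
  rw [count_eq]
  have hpre : PySem.List.slice xs none (some ((P.length : Nat) : Int)) = P :=
    (PySem.List.slice_to_natCast ..).trans (take_count xs)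
  have hsuf : PySem.List.slice xs (some ((P.length : Nat) : Int)) none = S :=
    (PySem.List.slice_from_natCast ..).trans (drop_count xs)
  rw [hpre, hsuf]
  -- compare via items = keys.map (k, getD k [])
  set dP := P.foldl pvIns PySem.Dict.empty with hdP
  set dF := S.foldl pvApp dP with hdF
  have hkeys : dF.keys = PySem.Set.ofList (P.map pvKey) := by
    rw [hdF, keys_foldl_pvApp, hdP, keys_foldl_pvIns]
  have hnd : dF.keys.Nodup := by rw [hkeys]; exact PySem.Set.nodup_ofList _
  rw [PySem.Dict.items_eq_map_keys dF hnd ([] : List (List String)), hkeys,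
    ← PySem.List.dedup_eq_ofList]
  apply List.map_congr_left
  intro k hkmem
  have hkmem' : k ∈ P.map pvKey := (PySem.List.mem_dedup _ _).mp hkmem
  have hkP : dP.contains k = true := by
    rw [hdP, PySem.Dict.contains_iff_mem_keys, keys_foldl_pvIns]
    exact (PySem.Set.mem_ofList _ _).mpr hkmem'
  have hfilterne : P.filter (fun l => pvKey l == k) ≠ [] := by
    obtain ⟨l, hl, hlk⟩ := List.mem_map.mp hkmem'
    intro he
    exact (List.filter_eq_nil_iff.mp he) l hl (by simp [hlk])
  have hgetD : dF.getD k [] =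
      [(P.filter (fun l => pvKey l == k)).getLastD []] ++ S.filter (fun l => pvKey l == k) := by
    rw [hdF, getD_foldl_pvApp _ _ _ hkP, hdP, getD_foldl_pvIns]
    simp [List.isEmpty_iff, hfilterne]
  simp only [pvKey] at hgetD hfilterne ⊢
  rw [hgetD, slice_last _ hfilterne]
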